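-- pv_equiv track=rewrite | github.com/piotrhelm/NESTFUL | data_v2/executable_functions/py_code_file_48.py | get_indices_of_min_absolute_difference
-- ===== SOURCE A (Python) =====
-- from typing import List
--
-- def get_indices_of_min_absolute_difference(array: List[int], target: int) -> List[int]:
--
--     """
--
--     Returns a list of indices where the absolute difference between the array's element and the target is the smallest.
--
--     Args:
--
--         array: A list of integers.
--
--         target: The target value.
--
--     """
--
--     min_diff = float('inf')
--
--     min_diff_indices = []
--
--
--
--     for i, element in enumerate(array):
--
--         diff = abs(element - target)
--
--         if diff < min_diff:
--
--             min_diff = diff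
--
--             min_diff_indices = [i]
--
--         elif diff == min_diff:
--
--             min_diff_indices.append(i)
--
--
--
--     return min_diff_indices
-- ===== SOURCE B (Python) =====
-- def get_indices_of_min_absolute_difference(array, target):
--     if not array:
--         return []
--     min_val = min(abs(element - target) for element in array)
--     return [i for i, element in enumerate(array) if abs(element - target) == min_val]
-- ===== Notes on version B (the rewrite author's own statement) =====
-- stated objective: simpler
-- what changed: Replaces the single-pass running-minimum with tie tracking by a two-pass compute-min-then-filter structure.
import Mathlib
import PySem

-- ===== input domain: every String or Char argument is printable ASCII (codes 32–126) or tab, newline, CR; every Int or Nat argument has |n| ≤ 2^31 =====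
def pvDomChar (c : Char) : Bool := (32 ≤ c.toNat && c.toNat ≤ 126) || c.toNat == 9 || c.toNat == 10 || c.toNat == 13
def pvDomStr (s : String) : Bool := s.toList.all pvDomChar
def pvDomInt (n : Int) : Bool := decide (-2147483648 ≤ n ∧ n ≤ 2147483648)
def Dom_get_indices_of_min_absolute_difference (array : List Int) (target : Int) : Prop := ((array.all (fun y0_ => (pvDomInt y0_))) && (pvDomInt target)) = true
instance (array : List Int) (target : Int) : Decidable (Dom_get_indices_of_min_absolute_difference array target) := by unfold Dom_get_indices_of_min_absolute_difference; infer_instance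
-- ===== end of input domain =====

-- B replaces A's single-pass running minimum with tie tracking by a two-pass compute-min-then-filter
-- structure (objective: simpler); return values are identical on all inputs.

-- ===== PORT A =====
-- A's loop state: (min_diff as Option Int, none = float('inf'); min_diff_indices)
def stepA (target : Int) (s : Option Int × List Int) (p : Int × Int) : Option Int × List Int :=
  let diff := |p.2 - target|
  match s.1 with
  | none => (some diff, [p.1])
  | some m =>
      if diff < m then (some diff, [p.1])
      else if diff = m then (some m, s.2 ++ [p.1])
      else s

def get_indices_of_min_absolute_difference (array : List Int) (target : Int) : List Int :=
  ((PySem.List.enumerate array).foldl (stepA target) (none, [])).2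

-- ===== PORT B =====
def get_indices_of_min_absolute_difference_alt (array : List Int) (target : Int) : List Int :=
  match array with
  | [] => []
  | x :: xs =>
    -- min(abs(e - target) for e in array): builtin min = running-min fold
    let m := xs.foldl (fun a e => min a |e - target|) |x - target|
    ((PySem.List.enumerate array).filter (fun p => |p.2 - target| == m)).map (·.1)

-- ===== PRECONDITION & SPEC =====
def Spec_get_indices_of_min_absolute_difference (array : List Int) (target : Int) (out : List Int) : Prop := out = get_indices_of_min_absolute_difference_alt array target
instance (array : List Int) (target : Int) (out : List Int) : Decidable (Spec_get_indices_of_min_absolute_difference array target out) := by unfold Spec_get_indices_of_min_absolute_difference; infer_instance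

-- ===== CLAIM (what is proved, stated in full; the proofs are below) =====
def Claim_equal_get_indices_of_min_absolute_difference : Prop := ∀ (array : List Int) (target : Int), Dom_get_indices_of_min_absolute_difference array target → Spec_get_indices_of_min_absolute_difference array target (get_indices_of_min_absolute_difference array target)

-- ===== LEMMAS AND PROOFS =====

-- the running minimum never increases
lemma foldl_min_le (t : Int) (l : List (Int × Int)) : ∀ (m : Int),
    l.foldl (fun a p => min a |p.2 - t|) m ≤ m := by
  induction l with
  | nil => intro m; simp
  | cons p l ih =>
    intro m
    calc (p :: l).foldl (fun a p => min a |p.2 - t|) m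
        = l.foldl (fun a p => min a |p.2 - t|) (min m |p.2 - t|) := rfl
      _ ≤ min m |p.2 - t| := ih _
      _ ≤ m := min_le_left _ _

-- characterisation of A's loop once the state is (some m, acc)
lemma loopA_eq (t : Int) (l : List (Int × Int)) : ∀ (m : Int) (acc : List Int),
    l.foldl (stepA t) (some m, acc) =
      (some (l.foldl (fun a p => min a |p.2 - t|) m),
       (if l.foldl (fun a p => min a |p.2 - t|) m < m then [] else acc)
         ++ (l.filter (fun p => |p.2 - t| == l.foldl (fun a p => min a |p.2 - t|) m)).map (·.1)) := by
  induction l with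
  | nil => intro m acc; simp
  | cons p l ih =>
    intro m acc
    have hM : ∀ c : Int, (p :: l).foldl (fun a p => min a |p.2 - t|) c
        = l.foldl (fun a p => min a |p.2 - t|) (min c |p.2 - t|) := fun _ => rfl
    by_cases h1 : |p.2 - t| < m
    · have hstep : stepA t (some m, acc) p = (some |p.2 - t|, [p.1]) := by
        simp [stepA, h1]
      have hmin : min m |p.2 - t| = |p.2 - t| := min_eq_right (le_of_lt h1)
      rw [List.foldl_cons, hstep, ih _ _, hM m, hmin]
      have hMle : l.foldl (fun a p => min a |p.2 - t|) |p.2 - t| ≤ |p.2 - t| :=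
        foldl_min_le t l _
      have hMltm : l.foldl (fun a p => min a |p.2 - t|) |p.2 - t| < m := by omega
      by_cases h2 : l.foldl (fun a p => min a |p.2 - t|) |p.2 - t| < |p.2 - t|
      · have hne : ¬ |p.2 - t| = l.foldl (fun a p => min a |p.2 - t|) |p.2 - t| := by omega
        simp [List.filter_cons, hne, h2, hMltm]
      · have heq : l.foldl (fun a p => min a |p.2 - t|) |p.2 - t| = |p.2 - t| := by omega
        simp [List.filter_cons, heq, hMltm]
        intro hc
        exact absurd h1 (not_lt.mpr hc)
    · have hmin : min m |p.2 - t| = m := min_eq_left (by omega)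
      have hMle : l.foldl (fun a p => min a |p.2 - t|) m ≤ m := foldl_min_le t l m
      by_cases h2 : |p.2 - t| = m
      · have hstep : stepA t (some m, acc) p = (some m, acc ++ [p.1]) := by
          simp [stepA, h1, h2]
        rw [List.foldl_cons, hstep, ih _ _, hM m, hmin]
        by_cases h3 : l.foldl (fun a p => min a |p.2 - t|) m < m
        · have hne : ¬ |p.2 - t| = l.foldl (fun a p => min a |p.2 - t|) m := by omega
          simp [List.filter_cons, hne, h3]
        · have heq : l.foldl (fun a p => min a |p.2 - t|) m = |p.2 - t| := by omega
          simp [List.filter_cons, heq, h3, h2]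
      · have hstep : stepA t (some m, acc) p = (some m, acc) := by
          simp [stepA, h1, h2]
        rw [List.foldl_cons, hstep, ih _ _, hM m, hmin]
        have hne : ¬ |p.2 - t| = l.foldl (fun a p => min a |p.2 - t|) m := by omega
        simp [List.filter_cons, hne]

-- the enumerated min-fold over pairs equals the plain fold over elements
lemma foldl_enumerate_min (t : Int) (xs : List Int) : ∀ (s : Int) (c : Int),
    (PySem.List.enumerate xs s).foldl (fun a p => min a |p.2 - t|) c
      = xs.foldl (fun a e => min a |e - t|) c := by
  induction xs with
  | nil => intro s c; simp [PySem.List.enumerate_nil]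
  | cons x xs ih => intro s c; rw [PySem.List.enumerate_cons]; simp [List.foldl_cons, ih]

-- ===== VERDICT (by name: the statement is the Claim_ definition above) =====
theorem get_indices_of_min_absolute_difference_spec : Claim_equal_get_indices_of_min_absolute_difference := by
  intro array target _
  unfold Spec_get_indices_of_min_absolute_difference
  cases array with
  | nil => rfl
  | cons x xs =>
    unfold get_indices_of_min_absolute_difference get_indices_of_min_absolute_difference_alt
    rw [PySem.List.enumerate_cons]
    have hstep : stepA target (none, []) ((0 : Int), x) = (some |x - target|, [(0 : Int)]) := rfl
    rw [List.foldl_cons, hstep, loopA_eq]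
    simp only [zero_add]
    simp only [foldl_enumerate_min target xs 1 |x - target|]
    have hMle : xs.foldl (fun a e => min a |e - target|) |x - target| ≤ |x - target| := by
      have := foldl_enumerate_min target xs 1 |x - target|
      have h2 := foldl_min_le target (PySem.List.enumerate xs 1) |x - target|
      omega
    by_cases h : xs.foldl (fun a e => min a |e - target|) |x - target| < |x - target|
    · have hne : ¬ |x - target| = xs.foldl (fun a e => min a |e - target|) |x - target| := by omega
      simp [List.filter_cons, hne, h]
    · have heq : xs.foldl (fun a e => min a |e - target|) |x - target| = |x - target| := by omega
      simp [List.filter_cons, heq]
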